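-- pv_equiv track=rewrite | github.com/yue-w/LeetCode | problems/2370. Longest Ideal Subsequence.py | method2
-- ===== SOURCE A (Python) =====
-- def method2(s, k):
--     """
--     Similar to mehtod1, but using template.
--     State machine. DP.
--     """
--     ## use a table to record the last occurance index for
--     ## each of the 26 characters. -1 if no occurance yet. (state machine)
--     last_occ = [-1] * 26
--     ## dp[i] the length of the longest ideal string ending with s[i].
--     dp = [1] * len(s)
--
--     for i in range(len(s)):
--         ## for each of the chars witihin distance k from s[i]
--         for ch in range(max(0, ord(s[i]) - ord('a') - k), min(25, ord(s[i]) - ord('a') + k) +1 ):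
--             j = last_occ[ch]
--             if j != -1:
--                 dp[i] = max(dp[i], dp[j] + 1)
--
--         last_occ[ord(s[i]) - ord('a')] = i
--
--     return max(dp)
-- ===== SOURCE B (Python) =====
-- def method2(s, k):
--     ## Quadratic DP over positions, no per-letter state: dp holds
--     ## (character code, length of longest ideal subsequence ending there)
--     ## for every prefix position; each new character links to the best
--     ## earlier entry whose code is within distance k.
--     dp = []
--     for ch in s:
--         c = ord(ch)
--         best = 0
--         for d, v in dp:
--             if abs(d - c) <= k and v > best:
--                 best = v
--         dp.append((c, best + 1))
--     return max(v for _, v in dp)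
-- ===== Notes on version B (the rewrite author's own statement) =====
-- stated objective: simpler
-- what changed: B replaces A's 26-letter state machine (last-occurrence index table plus per-letter window scan into a position dp array) by a direct quadratic DP with no per-letter state: each character links to the best earlier (code, value) entry within distance k by a plain scan of the already-computed entries; Pre_ restricts to the problem's natural domain of nonempty lowercase strings, excluding characters with codes 71-96 on which A's value arises from Python's negative-index wraparound into last_occ (A raises IndexError on codes <71 or >122 and ValueError on the empty string).
-- outside the precondition, e.g. on method2('Ga', 0): A returns 2, B returns 1
import Mathlib
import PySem

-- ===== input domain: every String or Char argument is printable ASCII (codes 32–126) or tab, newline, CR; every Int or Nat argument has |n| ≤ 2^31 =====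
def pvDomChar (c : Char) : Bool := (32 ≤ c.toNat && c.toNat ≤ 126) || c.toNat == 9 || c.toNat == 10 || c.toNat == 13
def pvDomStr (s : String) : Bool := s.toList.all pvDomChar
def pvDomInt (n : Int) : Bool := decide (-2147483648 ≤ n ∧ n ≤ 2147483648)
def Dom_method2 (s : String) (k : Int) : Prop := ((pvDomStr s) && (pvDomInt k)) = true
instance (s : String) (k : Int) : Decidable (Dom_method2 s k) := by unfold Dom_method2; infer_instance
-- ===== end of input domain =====

-- B replaces A's 26-letter state machine (last-occurrence table + per-letter window scan)
-- by a direct quadratic DP over positions with no per-letter state (objective: simpler).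

-- ===== PORT A =====
def method2 (s : String) (k : Int) : Int :=
  let cs := s.toList
  let lastocc : List Int := List.replicate 26 (-1)
  let dp : List Int := List.replicate cs.length 1
  let st :=
    (PySem.List.pyRange 0 (PySem.Str.len s) 1).foldl
      (fun (st : List Int × List Int) (i : Int) =>
        let lastocc := st.1
        let dp := st.2
        let c : Int := ((PySem.List.pyGetD cs i 'a').toNat : Int) - 97
        let dp2 :=
          (PySem.List.pyRange (max 0 (c - k)) (min 25 (c + k) + 1) 1).foldl
            (fun (dp : List Int) (chn : Int) =>
              let j := PySem.List.pyGetD lastocc chn (-1)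
              if j ≠ -1 then
                PySem.List.pySetD dp i
                  (max (PySem.List.pyGetD dp i 0) (PySem.List.pyGetD dp j 0 + 1))
              else dp) dp
        (PySem.List.pySetD lastocc c i, dp2))
      (lastocc, dp)
  -- max(dp): raises ValueError on the empty list, excluded by Pre_method2
  match PySem.List.max? st.2 (fun x => x) with
  | some m => m
  | none => 0

-- ===== PORT B =====
def method2_alt (s : String) (k : Int) : Int :=
  let dp := s.toList.foldl
    (fun (dp : List (Int × Int)) (ch : Char) =>
      let c : Int := (ch.toNat : Int)
      let best := dp.foldl
        (fun (best : Int) (p : Int × Int) =>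
          if |p.1 - c| ≤ k ∧ p.2 > best then p.2 else best) 0
      dp ++ [(c, best + 1)]) []
  -- max(generator): raises ValueError on the empty string, excluded by Pre_method2
  match PySem.List.max? (dp.map Prod.snd) (fun x => x) with
  | some m => m
  | none => 0

-- ===== PRECONDITION & SPEC =====
-- Pre_method2 restricts to the problem's natural domain (nonempty lowercase strings, as the
-- LeetCode task guarantees): on "" A raises ValueError (max of empty), on chars with code <71
-- or >122 A raises IndexError, and on chars with code 71..96 A's returned value arises from
-- Python's negative-index wraparound into last_occ, an artefact B does not mimic.
def Pre_method2 (s : String) (k : Int) : Prop :=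
  s ≠ "" ∧ (s.toList.all fun c => 97 ≤ c.toNat && c.toNat ≤ 122) = true
instance (s : String) (k : Int) : Decidable (Pre_method2 s k) := by unfold Pre_method2; infer_instance

def pvWitness_method2 : String × Int := ("acb", 1)

def Spec_method2 (s : String) (k : Int) (out : Int) : Prop := out = method2_alt s k
instance (s : String) (k : Int) (out : Int) : Decidable (Spec_method2 s k out) := by unfold Spec_method2; infer_instance

-- ===== CLAIM (what is proved, stated in full; the proofs are below) =====
def Claim_equal_method2 : Prop :=
  ∀ (s : String) (k : Int), Dom_method2 s k → Pre_method2 s k → Spec_method2 s k (method2 s k)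

-- ===== LEMMAS AND PROOFS =====

-- A's loop body, on an (index, character) pair.
def stepA (k : Int) (st : List Int × List Int) (p : Int × Char) : List Int × List Int :=
  let lastocc := st.1
  let dp := st.2
  let c : Int := ((p.2.toNat : Int)) - 97
  let dp2 :=
    (PySem.List.pyRange (max 0 (c - k)) (min 25 (c + k) + 1) 1).foldl
      (fun (dp : List Int) (chn : Int) =>
        let j := PySem.List.pyGetD lastocc chn (-1)
        if j ≠ -1 then
          PySem.List.pySetD dp p.1
            (max (PySem.List.pyGetD dp p.1 0) (PySem.List.pyGetD dp j 0 + 1))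
        else dp) dp
  (PySem.List.pySetD lastocc c p.1, dp2)

-- B's loop body.
def stepB (k : Int) (dp : List (Int × Int)) (ch : Char) : List (Int × Int) :=
  let c : Int := (ch.toNat : Int)
  let best := dp.foldl
    (fun (best : Int) (p : Int × Int) =>
      if |p.1 - c| ≤ k ∧ p.2 > best then p.2 else best) 0
  dp ++ [(c, best + 1)]

lemma method2_unfold (s : String) (k : Int) :
    method2 s k =
      match (PySem.List.max?
        (((PySem.List.pyRange 0 (PySem.Str.len s) 1).foldl
            (fun st i => stepA k st (i, PySem.List.pyGetD s.toList i 'a'))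
            (List.replicate 26 (-1), List.replicate s.toList.length 1)).2)
        (fun x => x)) with
      | some m => m
      | none => 0 := rfl

lemma method2_alt_unfold (s : String) (k : Int) :
    method2_alt s k =
      match PySem.List.max? ((s.toList.foldl (stepB k) []).map Prod.snd) (fun x => x) with
      | some m => m
      | none => 0 := rfl

-- conditional-max folds ------------------------------------------------------

lemma cmax_ge_init {α : Type} (P : α → Prop) [DecidablePred P] (v : α → Int) (l : List α) :
    ∀ a : Int, a ≤ l.foldl (fun b x => if P x then max b (v x) else b) a := by
  induction l with
  | nil => intro a; exact le_rfl
  | cons x l ih =>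
    intro a
    refine le_trans ?_ (ih _)
    dsimp only
    split_ifs <;> simp

lemma cmax_ge_elem {α : Type} (P : α → Prop) [DecidablePred P] (v : α → Int) (l : List α)
    (x : α) : ∀ a : Int, x ∈ l → P x →
      v x ≤ l.foldl (fun b y => if P y then max b (v y) else b) a := by
  induction l with
  | nil => intro a hx; exact absurd hx (List.not_mem_nil)
  | cons y l ih =>
    intro a hx hP
    rcases List.mem_cons.mp hx with rfl | h
    · simp only [List.foldl_cons, if_pos hP]
      exact le_trans (le_max_right _ _) (cmax_ge_init P v l _)
    · exact ih _ h hP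

lemma cmax_le {α : Type} (P : α → Prop) [DecidablePred P] (v : α → Int) (l : List α)
    (B : Int) : ∀ a : Int, a ≤ B → (∀ x ∈ l, P x → v x ≤ B) →
      l.foldl (fun b x => if P x then max b (v x) else b) a ≤ B := by
  induction l with
  | nil => intro a ha _; exact ha
  | cons x l ih =>
    intro a ha hall
    refine ih _ ?_ (fun y hy => hall y (List.mem_cons_of_mem x hy))
    dsimp only
    split_ifs with hP
    · exact max_le ha (hall x List.mem_cons_self hP)
    · exact ha

lemma cmax_of_none {α : Type} (P : α → Prop) [DecidablePred P] (v : α → Int) (l : List α)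
    (h : ∀ x ∈ l, ¬ P x) : ∀ a : Int,
      l.foldl (fun b x => if P x then max b (v x) else b) a = a := by
  induction l with
  | nil => intro a; rfl
  | cons x l ih =>
    intro a
    simp only [List.foldl_cons, if_neg (h x List.mem_cons_self)]
    exact ih (fun y hy => h y (List.mem_cons_of_mem x hy)) a

-- A's inner-loop body viewed as a pure running value (reading the pre-iteration dp).
def gA (lastocc dp : List Int) (v : Int) (chn : Int) : Int :=
  let j := PySem.List.pyGetD lastocc chn (-1)
  if j ≠ -1 then max v (PySem.List.pyGetD dp j 0 + 1) else v

lemma foldA_shift (lastocc dpA : List Int) (R : List Int) :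
    ∀ a : Int, R.foldl (gA lastocc dpA) (a + 1) =
      R.foldl (fun (b : Int) (chn : Int) =>
        if PySem.List.pyGetD lastocc chn (-1) ≠ -1 then
          max b (PySem.List.pyGetD dpA (PySem.List.pyGetD lastocc chn (-1)) 0)
        else b) a + 1 := by
  induction R with
  | nil => intro a; rfl
  | cons r R ih =>
    intro a
    by_cases hj : PySem.List.pyGetD lastocc r (-1) = -1
    · simp only [List.foldl_cons, gA, hj, ne_eq, not_true_eq_false, if_neg, not_false_eq_true]
      exact ih a
    · simp only [List.foldl_cons, gA, ne_eq, hj, not_false_eq_true, if_true]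
      rw [show max (a + 1) (PySem.List.pyGetD dpA (PySem.List.pyGetD lastocc r (-1)) 0 + 1)
          = max a (PySem.List.pyGetD dpA (PySem.List.pyGetD lastocc r (-1)) 0) + 1 from
          max_add_add_right ..]
      exact ih _

lemma foldB_eq_cmax (k c : Int) (l : List (Int × Int)) :
    ∀ a : Int,
      l.foldl (fun (best : Int) (p : Int × Int) =>
        if |p.1 - c| ≤ k ∧ p.2 > best then p.2 else best) a
      = l.foldl (fun (b : Int) (p : Int × Int) =>
        if |p.1 - c| ≤ k then max b p.2 else b) a := by
  induction l with
  | nil => intro a; rfl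
  | cons p l ih =>
    intro a
    have hstep : (if |p.1 - c| ≤ k ∧ p.2 > a then p.2 else a)
        = (if |p.1 - c| ≤ k then max a p.2 else a) := by
      split_ifs <;> omega
    simp only [List.foldl_cons, hstep]
    exact ih _

-- getD/set helpers -----------------------------------------------------------

lemma getD_set_self (l : List Int) (n : Nat) (a : Int) (h : n < l.length) :
    (l.set n a).getD n 0 = a := by
  simp [List.getD_eq_getElem?_getD, h]

lemma getD_set_ne (l : List Int) (n m : Nat) (a : Int) (h : n ≠ m) :
    (l.set n a).getD m 0 = l.getD m 0 := by
  simp [List.getD_eq_getElem?_getD, List.getElem?_set_ne h]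

lemma set_getD_self (l : List Int) (n : Nat) (h : n < l.length) :
    l.set n (l.getD n 0) = l := by
  rw [List.getD_eq_getElem l 0 h]; exact List.set_getElem_self ..

lemma getD_concat_length {α : Type} (l : List α) (x : α) (d : α) :
    (l ++ [x]).getD l.length d = x := by
  rw [List.getD_eq_getElem _ _ (by simp)]
  simp

lemma getD_concat_lt {α : Type} (l : List α) (x : α) (d : α) (j : Nat) (h : j < l.length) :
    (l ++ [x]).getD j d = l.getD j d := by
  rw [List.getD_eq_getElem _ _ (by simp; omega), List.getD_eq_getElem _ _ h]
  exact List.getElem_append_left ..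

-- A's inner loop only ever writes position m of dp, so it collapses to one `set`.
lemma inner_collapse (lastocc dp : List Int) (m : Nat) (hm : m < dp.length) :
    ∀ (R : List Int),
      (∀ x ∈ R, PySem.List.pyGetD lastocc x (-1) = -1 ∨
        ∃ j : Nat, j ≠ m ∧ PySem.List.pyGetD lastocc x (-1) = (j : Int)) →
      ∀ v : Int,
      R.foldl (fun (dp' : List Int) (chn : Int) =>
          let j := PySem.List.pyGetD lastocc chn (-1)
          if j ≠ -1 then
            PySem.List.pySetD dp' (m : Int)
              (max (PySem.List.pyGetD dp' (m : Int) 0) (PySem.List.pyGetD dp' j 0 + 1))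
          else dp') (dp.set m v)
        = dp.set m (R.foldl (gA lastocc dp) v) := by
  intro R
  induction R with
  | nil => intro _ v; rfl
  | cons r R ih =>
    intro hR v
    have hR' := fun x hx => hR x (List.mem_cons_of_mem r hx)
    by_cases hj : PySem.List.pyGetD lastocc r (-1) = -1
    · simp only [List.foldl_cons, hj, ne_eq, not_true_eq_false, if_neg, not_false_eq_true]
      rw [ih hR' v]
      congr 1
      simp [gA, hj]
    · rcases hR r List.mem_cons_self with h | ⟨j, hjm, hjeq⟩
      · exact absurd h hj
      · simp only [List.foldl_cons, hjeq]
        rw [if_pos (by simp)]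
        rw [PySem.List.pyGetD_natCast, PySem.List.pyGetD_natCast, getD_set_self dp m v hm,
          getD_set_ne dp m j v (fun h => hjm h.symm), PySem.List.pySetD_natCast,
          List.set_set, ih hR' (max v (dp.getD j 0 + 1))]
        congr 1
        simp only [gA, hjeq]
        rw [if_pos (by simp), PySem.List.pyGetD_natCast]

-- the invariant -------------------------------------------------------------

def LoopInv (k : Int) (n m : Nat) (lastocc dpA : List Int) (dpB : List (Int × Int)) : Prop :=
  m ≤ n ∧ dpA.length = n ∧ lastocc.length = 26 ∧ dpB.length = m ∧
  (∀ q ∈ dpB, 97 ≤ q.1 ∧ q.1 ≤ 122 ∧ 1 ≤ q.2) ∧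
  (∀ j : Nat, j < m → dpA.getD j 0 = (dpB.getD j (0, 0)).2) ∧
  (∀ p : Nat, m ≤ p → p < n → dpA.getD p 0 = 1) ∧
  (∀ u : Nat, u < 26 →
    (lastocc.getD u 0 = -1 ∧ ∀ q ∈ dpB, q.1 ≠ (u : Int) + 97) ∨
    (∃ j : Nat, j < m ∧ lastocc.getD u 0 = (j : Int) ∧
      (dpB.getD j (0, 0)).1 = (u : Int) + 97 ∧
      ∀ j' : Nat, j' < m → (dpB.getD j' (0, 0)).1 = (u : Int) + 97 →
        (dpB.getD j' (0, 0)).2 ≤ (dpB.getD j (0, 0)).2)) ∧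
  (k < 0 → ∀ q ∈ dpB, q.2 = 1)

lemma step_inv (k : Int) (n m : Nat) (hm : m < n) (lastocc dpA : List Int)
    (dpB : List (Int × Int)) (ch : Char) (hch : 97 ≤ ch.toNat ∧ ch.toNat ≤ 122)
    (h : LoopInv k n m lastocc dpA dpB) :
    LoopInv k n (m + 1) (stepA k (lastocc, dpA) ((m : Int), ch)).1
      (stepA k (lastocc, dpA) ((m : Int), ch)).2 (stepB k dpB ch) := by
  obtain ⟨hmn, hlenA, hlen26, hlenB, hq, h3, h4, h6, h8⟩ := h
  set c : Int := ((ch.toNat : Int)) - 97 with hc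
  have hc0 : 0 ≤ c := by omega
  have hc25 : c ≤ 25 := by omega
  set lo : Int := max 0 (c - k) with hlo
  set hi : Int := min 25 (c + k) with hhi
  set R : List Int := PySem.List.pyRange lo (hi + 1) 1 with hRdef
  have hlo0 : 0 ≤ lo := le_max_left _ _
  have hlo1 : c - k ≤ lo := le_max_right _ _
  have hhi25 : hi ≤ 25 := min_le_left _ _
  have hhi1 : hi ≤ c + k := min_le_right _ _
  have hRmem : ∀ x ∈ R, 0 ≤ x ∧ x < 26 := by
    intro x hx
    rw [hRdef, PySem.List.mem_pyRange_one] at hx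
    omega
  have hread : ∀ x : Int, 0 ≤ x → x < 26 →
      PySem.List.pyGetD lastocc x (-1) = lastocc.getD x.toNat 0 := by
    intro x h0 h26
    rw [PySem.List.pyGetD_eq_getElem lastocc (-1) h0 (by omega),
      List.getD_eq_getElem _ _ (by omega)]
  have hmemB : ∀ j : Nat, j < m → dpB.getD j (0, 0) ∈ dpB := by
    intro j hj
    rw [List.getD_eq_getElem _ _ (by omega)]
    exact List.getElem_mem _
  have hge0A : (0 : Int) ≤ R.foldl (fun b chn =>
      if PySem.List.pyGetD lastocc chn (-1) ≠ -1 then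
        max b (PySem.List.pyGetD dpA (PySem.List.pyGetD lastocc chn (-1)) 0)
      else b) 0 := cmax_ge_init _ _ R 0
  have hge0B : (0 : Int) ≤ dpB.foldl (fun b p =>
      if |p.1 - ((ch.toNat : Int))| ≤ k then max b p.2 else b) 0 := cmax_ge_init _ _ dpB 0
  -- the two window maxima agree
  have hfold : R.foldl (fun b chn =>
        if PySem.List.pyGetD lastocc chn (-1) ≠ -1 then
          max b (PySem.List.pyGetD dpA (PySem.List.pyGetD lastocc chn (-1)) 0)
        else b) 0
      = dpB.foldl (fun b p =>
        if |p.1 - ((ch.toNat : Int))| ≤ k then max b p.2 else b) 0 := by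
    apply le_antisymm
    · refine cmax_le _ _ R _ 0 hge0B ?_
      intro x hxR hPx
      obtain ⟨hx0, hx26⟩ := hRmem x hxR
      rw [hread x hx0 hx26] at hPx ⊢
      rcases h6 x.toNat (by omega) with ⟨hneg, _⟩ | ⟨j, hjm, hje, hletter, _⟩
      · exact absurd hneg hPx
      · rw [hje, PySem.List.pyGetD_natCast, h3 j hjm]
        refine cmax_ge_elem _ Prod.snd dpB (dpB.getD j (0, 0)) 0 (hmemB j hjm) ?_
        rw [hletter, abs_le]
        rw [hRdef, PySem.List.mem_pyRange_one] at hxR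
        have hxv : ((x.toNat : Nat) : Int) = x := Int.toNat_of_nonneg hx0
        constructor <;> omega
    · refine cmax_le _ Prod.snd dpB _ 0 hge0A ?_
      intro p hp hPp
      obtain ⟨hp97, hp122, hp1⟩ := hq p hp
      obtain ⟨j, hj, hpj⟩ := List.mem_iff_getElem.mp hp
      have hjm : j < m := by omega
      set u : Nat := (p.1 - 97).toNat with hu
      have huv : (u : Int) = p.1 - 97 := Int.toNat_of_nonneg (by omega)
      have hu26 : u < 26 := by omega
      have habs := abs_le.mp hPp
      have hmemR : ((u : Nat) : Int) ∈ R := by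
        rw [hRdef, PySem.List.mem_pyRange_one]
        constructor
        · rw [hlo]; exact max_le (by omega) (by omega)
        · have h1 : ((u : Nat) : Int) ≤ hi := by rw [hhi]; exact le_min (by omega) (by omega)
          omega
      have hru : PySem.List.pyGetD lastocc ((u : Nat) : Int) (-1) = lastocc.getD u 0 := by
        rw [hread _ (by omega) (by omega)]
        simp
      rcases h6 u hu26 with ⟨_, hnone⟩ | ⟨j0, hj0, hje0, hletter0, hdom0⟩
      · exact absurd (show p.1 = (u : Int) + 97 by omega) (hnone p hp)
      · have hPu : PySem.List.pyGetD lastocc ((u : Nat) : Int) (-1) ≠ -1 := by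
          rw [hru, hje0]; omega
        have hpj' : dpB.getD j (0, 0) = p := by
          rw [List.getD_eq_getElem _ _ (by omega), hpj]
        have hdomj := hdom0 j hjm (by rw [hpj']; omega)
        have hval : PySem.List.pyGetD dpA (PySem.List.pyGetD lastocc ((u : Nat) : Int) (-1)) 0
            = (dpB.getD j0 (0, 0)).2 := by
          rw [hru, hje0, PySem.List.pyGetD_natCast, h3 j0 hj0]
        have hle := cmax_ge_elem (fun chn => PySem.List.pyGetD lastocc chn (-1) ≠ -1)
          (fun chn => PySem.List.pyGetD dpA (PySem.List.pyGetD lastocc chn (-1)) 0)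
          R ((u : Nat) : Int) 0 hmemR hPu
        beta_reduce at hle
        rw [hval] at hle
        rw [hpj'] at hdomj
        omega
  -- A's step collapses to one write of cur at position m
  have hdpm : dpA.getD m 0 = 1 := h4 m le_rfl hm
  have hAfold :
      R.foldl (fun (dp' : List Int) (chn : Int) =>
          let j := PySem.List.pyGetD lastocc chn (-1)
          if j ≠ -1 then
            PySem.List.pySetD dp' ((m : Nat) : Int)
              (max (PySem.List.pyGetD dp' ((m : Nat) : Int) 0) (PySem.List.pyGetD dp' j 0 + 1))
          else dp') dpA
        = dpA.set m (R.foldl (gA lastocc dpA) 1) := by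
    have hset : dpA = dpA.set m 1 := by rw [← hdpm, set_getD_self dpA m (by omega)]
    conv_lhs => rw [hset]
    apply inner_collapse lastocc dpA m (by omega) R
    intro x hx
    obtain ⟨hx0, hx26⟩ := hRmem x hx
    rcases h6 x.toNat (by omega) with ⟨h1, _⟩ | ⟨j, hj1, hj3, _, _⟩
    · exact Or.inl (by rw [hread x hx0 hx26, h1])
    · exact Or.inr ⟨j, by omega, by rw [hread x hx0 hx26, hj3]⟩
  have hshift : R.foldl (gA lastocc dpA) 1 = R.foldl (fun b chn =>
        if PySem.List.pyGetD lastocc chn (-1) ≠ -1 then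
          max b (PySem.List.pyGetD dpA (PySem.List.pyGetD lastocc chn (-1)) 0)
        else b) 0 + 1 := by
    have := foldA_shift lastocc dpA R 0
    simpa using this
  set cur : Int := dpB.foldl (fun b p =>
      if |p.1 - ((ch.toNat : Int))| ≤ k then max b p.2 else b) 0 + 1 with hcurdef
  have hcur1 : 1 ≤ cur := by omega
  have hstepA : stepA k (lastocc, dpA) ((m : Int), ch)
      = (lastocc.set c.toNat ((m : Nat) : Int), dpA.set m cur) := by
    show (PySem.List.pySetD lastocc c ((m : Nat) : Int), _) = _
    rw [Prod.mk.injEq]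
    constructor
    · rw [PySem.List.pySetD_of_nonneg lastocc _ hc0]
    · show R.foldl _ dpA = _
      rw [hAfold, hshift, hfold]
  have hstepB : stepB k dpB ch = dpB ++ [((ch.toNat : Int), cur)] := by
    show dpB ++ [((ch.toNat : Int), dpB.foldl
      (fun (best : Int) (p : Int × Int) =>
        if |p.1 - ((ch.toNat : Int))| ≤ k ∧ p.2 > best then p.2 else best) 0 + 1)] = _
    rw [foldB_eq_cmax]
  rw [hstepA, hstepB]
  dsimp only
  have hnewD : (dpB ++ [((ch.toNat : Int), cur)]).getD m (0, 0) = ((ch.toNat : Int), cur) := by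
    rw [← hlenB, getD_concat_length]
  refine ⟨by omega, by simp [hlenA], by simp [hlen26], by simp [hlenB], ?_, ?_, ?_, ?_, ?_⟩
  · intro q hq'
    rcases List.mem_append.mp hq' with hmem | hmem
    · exact hq q hmem
    · rw [List.mem_singleton.mp hmem]
      exact ⟨by omega, by omega, hcur1⟩
  · intro j hj
    by_cases hjm : j = m
    · subst hjm
      rw [getD_set_self dpA j cur (by omega), hnewD]
    · have hjm' : j < m := by omega
      rw [getD_set_ne dpA m j cur (fun hh => hjm hh.symm),
        getD_concat_lt dpB _ _ j (by omega)]
      exact h3 j hjm'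
  · intro p hp1 hp2
    rw [getD_set_ne dpA m p cur (by omega)]
    exact h4 p (by omega) hp2
  · intro u hu
    by_cases huc : u = c.toNat
    · subst huc
      right
      refine ⟨m, by omega, getD_set_self lastocc c.toNat _ (by omega), ?_, ?_⟩
      · rw [hnewD]
        show ((ch.toNat : Int)) = (c.toNat : Int) + 97
        omega
      · intro j' hj' hlet
        by_cases hj'm : j' = m
        · subst hj'm
          exact le_rfl
        · have hj'lt : j' < m := by omega
          rw [getD_concat_lt dpB _ _ j' (by omega)] at hlet ⊢
          rw [hnewD]
          show (dpB.getD j' (0, 0)).2 ≤ cur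
          rcases h6 c.toNat (by omega) with ⟨_, hnone⟩ | ⟨j0, hj0, _, hletter0, hdom0⟩
          · exact absurd hlet (hnone _ (hmemB j' hj'lt))
          · by_cases hk : k < 0
            · have h1 := h8 hk (dpB.getD j' (0, 0)) (hmemB j' hj'lt)
              omega
            · have hd := hdom0 j' hj'lt hlet
              have hcomp : |(dpB.getD j0 (0, 0)).1 - ((ch.toNat : Int))| ≤ k := by
                rw [hletter0, abs_le]
                constructor <;> omega
              have hle := cmax_ge_elem (fun p => |p.1 - ((ch.toNat : Int))| ≤ k)
                Prod.snd dpB (dpB.getD j0 (0, 0)) 0 (hmemB j0 hj0) hcomp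
              beta_reduce at hle
              omega
    · have hset : (lastocc.set c.toNat ((m : Nat) : Int)).getD u 0 = lastocc.getD u 0 :=
        getD_set_ne lastocc c.toNat u _ (fun hh => huc hh.symm)
      have hux : ((ch.toNat : Int)) ≠ (u : Int) + 97 := by omega
      rcases h6 u hu with ⟨hneg, hnone⟩ | ⟨j0, hj0, hje0, hletter0, hdom0⟩
      · left
        refine ⟨by rw [hset]; exact hneg, ?_⟩
        intro q hq'
        rcases List.mem_append.mp hq' with hmem | hmem
        · exact hnone q hmem
        · rw [List.mem_singleton.mp hmem]
          exact hux
      · right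
        refine ⟨j0, by omega, by rw [hset]; exact hje0,
          by rw [getD_concat_lt dpB _ _ j0 (by omega)]; exact hletter0, ?_⟩
        intro j' hj' hlet
        by_cases hj'm : j' = m
        · subst hj'm
          rw [hnewD] at hlet
          exact absurd hlet hux
        · rw [getD_concat_lt dpB _ _ j' (by omega)] at hlet ⊢
          rw [getD_concat_lt dpB _ _ j0 (by omega)]
          exact hdom0 j' (by omega) hlet
  · intro hk q hq'
    rcases List.mem_append.mp hq' with hmem | hmem
    · exact h8 hk q hmem
    · rw [List.mem_singleton.mp hmem]
      show cur = 1
      rw [hcurdef, cmax_of_none _ _ dpB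
        (fun p _ => by have := abs_nonneg (p.1 - ((ch.toNat : Int))); omega) 0]
      norm_num

lemma run_inv (k : Int) (n : Nat) :
    ∀ (ts : List Char) (m : Nat) (lastocc dpA : List Int) (dpB : List (Int × Int)),
      m + ts.length ≤ n → (∀ ch ∈ ts, 97 ≤ ch.toNat ∧ ch.toNat ≤ 122) →
      LoopInv k n m lastocc dpA dpB →
      LoopInv k n (m + ts.length)
        ((PySem.List.enumerate ts (m : Int)).foldl (stepA k) (lastocc, dpA)).1
        ((PySem.List.enumerate ts (m : Int)).foldl (stepA k) (lastocc, dpA)).2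
        (ts.foldl (stepB k) dpB) := by
  intro ts
  induction ts with
  | nil =>
    intro m lastocc dpA dpB _ _ h
    simpa [PySem.List.enumerate] using h
  | cons ch ts ih =>
    intro m lastocc dpA dpB hlen hch h
    have hmn : m < n := by simp at hlen; omega
    have h1 := step_inv k n m hmn lastocc dpA dpB ch (hch ch List.mem_cons_self) h
    have henum : PySem.List.enumerate (ch :: ts) (m : Int)
        = ((m : Int), ch) :: PySem.List.enumerate ts ((m : Int) + 1) := by
      simp [PySem.List.enumerate]
    rw [henum]
    simp only [List.foldl_cons]
    have hcast : ((m : Int) + 1) = (((m + 1 : Nat)) : Int) := by push_cast; ring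
    rw [hcast]
    have h2 := ih (m + 1) (stepA k (lastocc, dpA) ((m : Int), ch)).1
      (stepA k (lastocc, dpA) ((m : Int), ch)).2 (stepB k dpB ch)
      (by simp at hlen ⊢; omega) (fun c hc => hch c (List.mem_cons_of_mem ch hc)) h1
    have hlen' : m + (ch :: ts).length = (m + 1) + ts.length := by simp; omega
    rw [hlen']
    simpa using h2

-- ===== VERDICT (by name: the statement is the Claim_ definition above) =====
theorem method2_spec : Claim_equal_method2 := by
  unfold Claim_equal_method2
  intro s k _ hpre
  unfold Spec_method2
  obtain ⟨hne0, hall⟩ := hpre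
  have hch : ∀ c ∈ s.toList, 97 ≤ c.toNat ∧ c.toNat ≤ 122 := by simpa using hall
  rw [method2_unfold, method2_alt_unfold]
  have hlen : PySem.Str.len s = PySem.List.len s.toList := by
    rw [PySem.Str.len_eq]; simp [pysem]
  have henum :
      (PySem.List.pyRange 0 (PySem.Str.len s) 1).foldl
          (fun st i => stepA k st (i, PySem.List.pyGetD s.toList i 'a'))
          (List.replicate 26 (-1), List.replicate s.toList.length 1)
        = (PySem.List.enumerate s.toList 0).foldl (stepA k)
            (List.replicate 26 (-1), List.replicate s.toList.length 1) := by
    rw [PySem.List.enumerate_eq_map_pyRange s.toList 'a', List.foldl_map, hlen]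
  rw [henum]
  have h0 : LoopInv k s.toList.length 0 (List.replicate 26 (-1))
      (List.replicate s.toList.length 1) [] := by
    refine ⟨Nat.zero_le _, by simp, by simp, by simp, by simp, ?_, ?_, ?_, by simp⟩
    · intro j hj; omega
    · intro p _ hp
      rw [List.getD_eq_getElem _ _ (by simpa using hp)]
      exact List.getElem_replicate ..
    · intro u hu
      refine Or.inl ⟨?_, by simp⟩
      rw [List.getD_eq_getElem _ _ (by simpa using hu)]
      exact List.getElem_replicate ..
  have hrun := run_inv k s.toList.length s.toList 0 (List.replicate 26 (-1))
    (List.replicate s.toList.length 1) [] (by simp) hch h0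
  simp only [Nat.cast_zero, zero_add] at hrun
  obtain ⟨_, hlenA, _, hlenB, _, h3, _, _, _⟩ := hrun
  have hAeq :
      ((PySem.List.enumerate s.toList 0).foldl (stepA k)
        (List.replicate 26 (-1), List.replicate s.toList.length 1)).2
      = (s.toList.foldl (stepB k) []).map Prod.snd := by
    apply List.ext_getElem
    · simp only [List.length_map]; rw [hlenA, hlenB]
    · intro j hja hjb
      rw [← List.getD_eq_getElem _ 0 hja]
      rw [hlenA] at hja
      rw [h3 j hja]
      rw [List.getElem_map, List.getD_eq_getElem _ _ (by rw [hlenB]; exact hja)]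
  rw [hAeq]
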